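-- pv_equiv track=rewrite | github.com/ytoolshed/range | python_seco_range/source/seco/range/sync/__init__.py | range_data_merge
-- ===== SOURCE A (Python) =====
-- def range_data_merge(main_data, added_data):
--   """
--   Take main data and then use the added data to merge in and override existing
--   keys
--   """
--   for cluster in main_data:
--     if cluster in added_data:
--       main_data[cluster].update(added_data[cluster])
--
--   for cluster in added_data:
--     if cluster not in main_data:
--       main_data[cluster] = added_data[cluster]
--
--   return main_data
-- ===== SOURCE B (Python) =====
-- def range_data_merge(main_data, added_data):
--   """
--   Pure rebuild (no mutation, unlike A which updates main_data in place):
--   compute the result's key order, then build a fresh dict whose value for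
--   each cluster is the dict-union of both sources for that cluster.
--   """
--   order = list(main_data) + [c for c in added_data if c not in main_data]
--   return {c: {**main_data.get(c, {}), **added_data.get(c, {})} for c in order}
-- ===== Notes on version B (the rewrite author's own statement) =====
-- stated objective: alternative
-- what changed: A mutates main_data with two update-or-insert loops; B is a pure rebuild: it computes the output key order, then constructs a fresh dict by a comprehension taking the dict-union {**main.get(c,{}), **added.get(c,{})} per cluster (no mutation, no per-key branch).
import Mathlib
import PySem

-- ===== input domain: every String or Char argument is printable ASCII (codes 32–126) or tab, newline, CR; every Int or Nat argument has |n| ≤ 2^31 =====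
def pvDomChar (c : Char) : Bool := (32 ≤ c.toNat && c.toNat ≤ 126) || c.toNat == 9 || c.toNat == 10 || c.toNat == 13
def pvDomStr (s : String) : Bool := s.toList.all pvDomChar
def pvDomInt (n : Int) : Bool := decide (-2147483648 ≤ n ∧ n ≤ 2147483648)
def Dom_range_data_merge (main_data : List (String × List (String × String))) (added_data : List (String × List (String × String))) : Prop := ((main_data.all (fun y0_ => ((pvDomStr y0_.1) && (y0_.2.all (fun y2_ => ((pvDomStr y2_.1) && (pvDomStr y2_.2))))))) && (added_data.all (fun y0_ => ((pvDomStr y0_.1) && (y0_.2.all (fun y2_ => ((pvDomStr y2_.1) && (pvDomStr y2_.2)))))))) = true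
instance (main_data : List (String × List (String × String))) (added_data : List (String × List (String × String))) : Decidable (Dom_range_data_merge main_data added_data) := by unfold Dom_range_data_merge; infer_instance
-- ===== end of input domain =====

-- B rebuilds the merged dict from scratch (key order + per-cluster dict-union) instead of A's two in-place
-- update/insert loops; in Python A mutates main_data while B does not — the equivalence proved here is about
-- the RETURNED dict's items only.

-- dict-of-dicts ⟷ association-list boundary (shared by both ports)
def pvToDict (l : List (String × List (String × String))) : PySem.Dict String (PySem.Dict String String) :=
  PySem.Dict.ofList (l.map (fun p => (p.1, PySem.Dict.ofList p.2)))

def pvFromDict (d : PySem.Dict String (PySem.Dict String String)) : List (String × List (String × String)) :=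
  d.items.map (fun p => (p.1, p.2.items))

-- ===== PORT A =====
def range_data_merge (main_data : List (String × List (String × String))) (added_data : List (String × List (String × String))) : List (String × List (String × String)) :=
  let m := pvToDict main_data
  let d := pvToDict added_data
  -- for cluster in main_data: if cluster in added_data: main_data[cluster].update(added_data[cluster])
  let m1 := m.keys.foldl (fun acc k =>
    if d.contains k then
      acc.insert k ((acc.getD k PySem.Dict.empty).update (d.getD k PySem.Dict.empty).items)
    else acc) m
  -- for cluster in added_data: if cluster not in main_data: main_data[cluster] = added_data[cluster]
  let m2 := d.keys.foldl (fun acc k =>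
    if acc.contains k then acc else acc.insert k (d.getD k PySem.Dict.empty)) m1
  pvFromDict m2

-- ===== PORT B =====
def range_data_merge_alt (main_data : List (String × List (String × String))) (added_data : List (String × List (String × String))) : List (String × List (String × String)) :=
  let m := pvToDict main_data
  let d := pvToDict added_data
  -- order = list(main_data) + [c for c in added_data if c not in main_data]
  let order := m.keys ++ d.keys.filter (fun c => !(m.contains c))
  -- {c: {**main_data.get(c, {}), **added_data.get(c, {})} for c in order}
  order.map (fun c =>
    (c, ((m.getD c PySem.Dict.empty).update (d.getD c PySem.Dict.empty).items).items))

-- ===== PRECONDITION & SPEC =====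
def Spec_range_data_merge (main_data : List (String × List (String × String))) (added_data : List (String × List (String × String))) (out : List (String × List (String × String))) : Prop := out = range_data_merge_alt main_data added_data
instance (main_data : List (String × List (String × String))) (added_data : List (String × List (String × String))) (out : List (String × List (String × String))) : Decidable (Spec_range_data_merge main_data added_data out) := by unfold Spec_range_data_merge; infer_instance

-- ===== CLAIM (what is proved, stated in full; the proofs are below) =====
def Claim_equal_range_data_merge : Prop := ∀ (main_data : List (String × List (String × String))) (added_data : List (String × List (String × String))), Dom_range_data_merge main_data added_data → Spec_range_data_merge main_data added_data (range_data_merge main_data added_data)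

-- ===== LEMMAS AND PROOFS =====

theorem pv_contains_congr {κ ν ν' : Type} [BEq κ] (d : PySem.Dict κ ν) (d' : PySem.Dict κ ν')
    (h : d.keys = d'.keys) (k : κ) : d.contains k = d'.contains k := by
  have : ∀ {ν₀ : Type} (e : PySem.Dict κ ν₀), e.contains k = e.keys.any (· == k) := by
    intro ν₀ e
    simp only [PySem.Dict.contains, PySem.Dict.keys, List.any_map]
    rfl
  rw [this d, this d', h]

-- A's first loop: in-place value rewrite over the dict's own (nodup) keys
theorem pv_phase1_items {κ ν : Type} [BEq κ] [LawfulBEq κ] (c : κ → Bool) (g : κ → ν → ν) (dflt : ν) :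
    ∀ (ks : List κ) (acc : PySem.Dict κ ν), acc.keys.Nodup → ks.Nodup →
      (∀ k ∈ ks, acc.contains k = true) →
      (ks.foldl (fun a k => if c k then a.insert k (g k (a.getD k dflt)) else a) acc).items
        = acc.items.map (fun p => if ks.contains p.1 && c p.1 then (p.1, g p.1 p.2) else p) := by
  intro ks
  induction ks with
  | nil => intro acc _ _ _; simp
  | cons k ks ih =>
    intro acc hnd hks hall
    have hkacc : acc.contains k = true := hall k (by simp)
    have hknot : k ∉ ks := (List.nodup_cons.mp hks).1
    have hksnd : ks.Nodup := (List.nodup_cons.mp hks).2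
    simp only [List.foldl_cons]
    by_cases hc : c k = true
    · rw [if_pos hc]
      have hkeys : (acc.insert k (g k (acc.getD k dflt))).keys = acc.keys :=
        PySem.Dict.keys_insert_of_contains acc _ hkacc
      have hall' : ∀ k' ∈ ks, (acc.insert k (g k (acc.getD k dflt))).contains k' = true := by
        intro k' hk'
        rw [PySem.Dict.contains_insert]
        simp [hall k' (by simp [hk'])]
      rw [ih _ (hkeys ▸ hnd) hksnd hall',
          PySem.Dict.items_insert_of_contains acc _ hkacc, List.map_map]
      apply List.map_congr_left
      intro p hp
      by_cases hpk : p.1 = k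
      · have hget : acc.getD k dflt = p.2 := by
          have hmem : (k, p.2) ∈ acc.items := by rw [← hpk]; exact hp
          exact PySem.Dict.getD_of_mem_items acc hmem hnd dflt
        simp [Function.comp, hpk, hget, hc, hknot]
      · have hbk : (p.1 == k) = false := by simp [hpk]
        simp [Function.comp, hbk, hpk]
    · rw [if_neg hc]
      rw [ih acc hnd hksnd (fun k' hk' => hall k' (by simp [hk']))]
      apply List.map_congr_left
      intro p hp
      by_cases hpk : p.1 = k
      · simp [hpk, Bool.of_not_eq_true hc]
      · have hbk : (p.1 == k) = false := by simp [hpk]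
        simp [hbk]

-- A's second loop: append the missing keys
theorem pv_phase2_items {κ ν : Type} [BEq κ] [LawfulBEq κ] (h : κ → ν) :
    ∀ (ks : List κ) (acc : PySem.Dict κ ν), acc.keys.Nodup → ks.Nodup →
      (ks.foldl (fun a k => if a.contains k then a else a.insert k (h k)) acc).items
        = acc.items ++ (ks.filter (fun k => !acc.contains k)).map (fun k => (k, h k)) := by
  intro ks
  induction ks with
  | nil => intro acc _ _; simp
  | cons k ks ih =>
    intro acc hnd hks
    have hknot : k ∉ ks := (List.nodup_cons.mp hks).1
    have hksnd : ks.Nodup := (List.nodup_cons.mp hks).2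
    simp only [List.foldl_cons]
    by_cases hk : acc.contains k = true
    · rw [if_pos hk, ih acc hnd hksnd, List.filter_cons]
      simp [hk]
    · have hk' : acc.contains k = false := Bool.of_not_eq_true hk
      rw [if_neg hk, ih _ (PySem.Dict.nodup_keys_insert acc k (h k) hnd) hksnd,
          PySem.Dict.items_insert_of_not_contains acc _ hk', List.filter_cons]
      have hfc : ks.filter (fun k' => !(acc.insert k (h k)).contains k')
          = ks.filter (fun k' => !acc.contains k') := by
        apply List.filter_congr
        intro k' hk'mem
        rw [PySem.Dict.contains_insert]
        have : (k' == k) = false := by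
          simp only [beq_eq_false_iff_ne, ne_eq]
          rintro rfl; exact hknot hk'mem
        simp [this]
      simp [hfc, hk']

-- any value sitting in an update-built dict came from the seed or from the pair list
theorem pv_mem_values_update {κ ν : Type} [BEq κ] [LawfulBEq κ] (l : List (κ × ν)) :
    ∀ (d : PySem.Dict κ ν) (w : ν), w ∈ (d.update l).values → w ∈ d.values ∨ ∃ p ∈ l, w = p.2 := by
  induction l with
  | nil => intro d w h; exact Or.inl (by simpa [PySem.Dict.update] using h)
  | cons q l ih =>
    intro d w h
    have h' : w ∈ ((d.insert q.1 q.2).update l).values := by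
      simpa [PySem.Dict.update] using h
    rcases ih _ w h' with hv | ⟨p, hp, hw⟩
    · rcases PySem.Dict.mem_values_insert d q.1 q.2 w hv with hq | hv'
      · exact Or.inr ⟨q, by simp, hq⟩
      · exact Or.inl hv'
    · exact Or.inr ⟨p, by simp [hp], hw⟩

-- every inner dict reachable from pvToDict has nodup keys
theorem pv_sub_nodup (l : List (String × List (String × String))) (k : String) :
    ((pvToDict l).getD k PySem.Dict.empty).keys.Nodup := by
  by_cases hc : (pvToDict l).contains k = true
  · have hs : ((pvToDict l).get? k).isSome := by
      rw [← PySem.Dict.contains_eq_isSome_get?]; exact hc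
    obtain ⟨v, hv⟩ := Option.isSome_iff_exists.mp hs
    rw [PySem.Dict.getD_of_get?_eq_some _ _ hv]
    have hmem : (k, v) ∈ (pvToDict l).items := PySem.Dict.mem_items_of_get?_eq_some _ hv
    have hval : v ∈ (pvToDict l).values := by
      simp only [PySem.Dict.values]
      exact List.mem_map_of_mem hmem
    have := pv_mem_values_update (l.map (fun p => (p.1, PySem.Dict.ofList p.2)))
        PySem.Dict.empty v (by simpa [pvToDict, PySem.Dict.ofList] using hval)
    rcases this with hv0 | ⟨p, hp, hw⟩
    · simp [PySem.Dict.values, PySem.Dict.empty] at hv0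
    · obtain ⟨q, _, rfl⟩ := List.mem_map.mp hp
      subst hw
      exact PySem.Dict.nodup_keys_ofList _
  · rw [PySem.Dict.getD_of_not_contains _ _ (Bool.of_not_eq_true hc)]
    simp [PySem.Dict.keys, PySem.Dict.empty]

-- rebuilding a key-nodup dict from its own items gives it back
theorem pv_update_empty_items {κ ν : Type} [BEq κ] [LawfulBEq κ]
    (e : PySem.Dict κ ν) (h : e.keys.Nodup) : PySem.Dict.empty.update e.items = e := by
  apply PySem.Dict.ext
  have := PySem.Dict.items_foldl_insert_fresh e.items Prod.fst Prod.snd PySem.Dict.empty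
      (fun a _ => PySem.Dict.contains_empty a.1) h
  simpa [PySem.Dict.update] using this

-- the two item lists coincide
theorem pv_merge_items_eq (main_data added_data : List (String × List (String × String))) :
    range_data_merge main_data added_data = range_data_merge_alt main_data added_data := by
  unfold range_data_merge range_data_merge_alt
  set m := pvToDict main_data with hm
  set d := pvToDict added_data with hd
  have hmnd : m.keys.Nodup := PySem.Dict.nodup_keys_ofList _
  have hdnd : d.keys.Nodup := PySem.Dict.nodup_keys_ofList _
  -- phase 1
  have hm1 := pv_phase1_items (fun k => d.contains k)
      (fun k w => w.update (d.getD k PySem.Dict.empty).items) PySem.Dict.empty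
      m.keys m hmnd hmnd (fun k hk => (PySem.Dict.contains_iff_mem_keys m k).mpr hk)
  set m1 := m.keys.foldl (fun acc k =>
    if d.contains k then
      acc.insert k ((acc.getD k PySem.Dict.empty).update (d.getD k PySem.Dict.empty).items)
    else acc) m with hm1def
  have hm1keys : m1.keys = m.keys := by
    simp only [PySem.Dict.keys, hm1, List.map_map]
    apply List.map_congr_left
    intro p _
    simp only [Function.comp]
    split <;> rfl
  have hm1nd : m1.keys.Nodup := hm1keys ▸ hmnd
  -- phase 2
  have hm2 := pv_phase2_items (fun k => d.getD k PySem.Dict.empty) d.keys m1 hm1nd hdnd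
  -- compare item lists with B's rebuild
  simp only [pvFromDict]
  rw [hm2, hm1]
  simp only [List.map_append, List.map_map]
  have hcc : (fun k => !m1.contains k) = (fun k => !m.contains k) := by
    funext k
    rw [pv_contains_congr m1 m hm1keys]
  rw [hcc]
  refine congrArg₂ (fun (a b : List (String × List (String × String))) => a ++ b) ?_ ?_
  · -- first chunk: over m's own keys
    rw [PySem.Dict.items_eq_map_keys m hmnd PySem.Dict.empty, List.map_map]
    apply List.map_congr_left
    intro k hk
    have hkc : m.keys.contains k = true := List.elem_eq_true_of_mem hk
    by_cases hdk : d.contains k = true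
    · simp [Function.comp, hk, hdk]
    · have hdk' : d.contains k = false := Bool.of_not_eq_true hdk
      have hget : d.getD k PySem.Dict.empty = PySem.Dict.empty :=
        PySem.Dict.getD_of_not_contains _ _ hdk'
      simp only [Function.comp_apply, hget]
      simp [hk, hdk', PySem.Dict.update, PySem.Dict.empty]
  · -- second chunk: the keys only in added_data
    apply List.map_congr_left
    intro k hk
    have hkm : m.contains k = false := by
      have := (List.mem_filter.mp hk).2
      simpa using this
    have hgm : m.getD k PySem.Dict.empty = PySem.Dict.empty :=
      PySem.Dict.getD_of_not_contains _ _ hkm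
    rw [Function.comp_apply, hgm,
        pv_update_empty_items _ (pv_sub_nodup added_data k)]

-- ===== VERDICT (by name: the statement is the Claim_ definition above) =====
theorem range_data_merge_spec : Claim_equal_range_data_merge := by
  intro main_data added_data _
  exact pv_merge_items_eq main_data added_data
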